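-- pv_equiv track=rewrite | github.com/wink4u/Algorithm | 프로그래머스/파이썬/Lv3/불량 사용자.py | find_ban
-- ===== SOURCE A (Python) =====
-- def find_ban(combi, check_ban):
--     for i in range(len(combi)):
--         if len(combi[i]) != len(check_ban[i]):
--                 return False
--
--         for j in range(len(combi[i])):
--             if combi[i][j] != check_ban[i][j]:
--                 if check_ban[i][j] != '*':
--                     return False
--                 else:
--                     continue
--
--     return True
-- ===== SOURCE B (Python) =====
-- import re
--
-- def find_ban(combi, check_ban):
--     # Compile each ban string to a regex ('.' for '*', escaped literal otherwise)
--     # and let the regex engine decide with fullmatch (DOTALL so '.' matches any char).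
--     for i in range(len(combi)):
--         pattern = ''.join('.' if ch == '*' else re.escape(ch) for ch in check_ban[i])
--         if re.fullmatch(pattern, combi[i], re.DOTALL) is None:
--             return False
--     return True
-- ===== Notes on version B (the rewrite author's own statement) =====
-- stated objective: alternative
-- what changed: Replaced the hand-written length check and nested character loop by compiling each ban pattern to a regular expression ('.' for '*', re.escape for literals) and delegating the match decision to re.fullmatch with DOTALL.
import Mathlib
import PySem

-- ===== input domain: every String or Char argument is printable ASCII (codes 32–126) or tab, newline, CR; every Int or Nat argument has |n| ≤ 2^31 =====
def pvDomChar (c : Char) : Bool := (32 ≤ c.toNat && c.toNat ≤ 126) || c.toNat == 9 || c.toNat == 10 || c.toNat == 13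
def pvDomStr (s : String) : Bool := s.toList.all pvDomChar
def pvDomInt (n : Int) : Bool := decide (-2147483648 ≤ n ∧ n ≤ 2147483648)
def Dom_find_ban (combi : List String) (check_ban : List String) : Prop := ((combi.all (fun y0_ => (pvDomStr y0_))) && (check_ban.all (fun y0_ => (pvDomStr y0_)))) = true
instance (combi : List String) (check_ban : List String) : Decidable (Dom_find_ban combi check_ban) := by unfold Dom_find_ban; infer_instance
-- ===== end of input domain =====

-- B replaces A's hand-written length check and nested character loop by compiling each
-- ban pattern to a regex ('.' for '*', escaped literal otherwise) and deciding with
-- fullmatch (objective: alternative; same cost).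

-- ===== PORT A =====
-- inner loop: for j in range(len(combi[i])): …
def pvCharLoopA (c b : List Char) (j : Nat) : Bool :=
  if _h : j < c.length then
    match PySem.List.pyGet? c (j : Int), PySem.List.pyGet? b (j : Int) with
    | some cj, some bj =>
        if cj ≠ bj then
          (if bj ≠ '*' then false else pvCharLoopA c b (j + 1))
        else pvCharLoopA c b (j + 1)
    | _, _ => false   -- IndexError (unreachable: lengths were checked equal)
  else true
termination_by c.length - j

-- outer loop: for i in range(len(combi)): …
def pvOuterA (combi check_ban : List String) (i : Nat) : Bool :=
  if _h : i < combi.length then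
    match PySem.List.pyGet? combi (i : Int), PySem.List.pyGet? check_ban (i : Int) with
    | some c, some b =>
        if PySem.Str.len c ≠ PySem.Str.len b then false
        else if pvCharLoopA c.toList b.toList 0 then pvOuterA combi check_ban (i + 1)
        else false
    | _, _ => false   -- IndexError on check_ban[i]: excluded by Pre_find_ban
  else true
termination_by combi.length - i

def find_ban (combi : List String) (check_ban : List String) : Bool :=
  pvOuterA combi check_ban 0

-- ===== PORT B =====
-- One regex token: '.' (from '*') or an escaped literal character.
inductive pvTok
  | dot : pvTok
  | lit : Char → pvTok
deriving DecidableEq, Repr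

-- ''.join('.' if ch == '*' else re.escape(ch) for ch in check_ban[i]):
-- re.escape only affects regex syntax, so semantically a token per pattern char.
def pvCompile (b : List Char) : List pvTok :=
  b.map (fun ch => if ch = '*' then pvTok.dot else pvTok.lit ch)

-- Hand port of re.fullmatch(pattern, s, re.DOTALL) for a pattern that is a plain
-- concatenation of single-character tokens: exact, since each token consumes exactly
-- one character ('.' under DOTALL matches ANY character) and fullmatch requires the
-- whole string to be consumed.
def pvFullmatch : List pvTok → List Char → Bool
  | [], [] => true
  | pvTok.dot :: ts, _ :: cs => pvFullmatch ts cs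
  | pvTok.lit x :: ts, c :: cs => (x == c) && pvFullmatch ts cs
  | _, _ => false

-- for i in range(len(combi)): compile check_ban[i], fullmatch against combi[i]
def pvOuterB (combi check_ban : List String) (i : Nat) : Bool :=
  if _h : i < combi.length then
    match PySem.List.pyGet? combi (i : Int), PySem.List.pyGet? check_ban (i : Int) with
    | some c, some b =>
        if pvFullmatch (pvCompile b.toList) c.toList then pvOuterB combi check_ban (i + 1)
        else false
    | _, _ => false   -- IndexError on check_ban[i]: excluded by Pre_find_ban
  else true
termination_by combi.length - i

def find_ban_alt (combi : List String) (check_ban : List String) : Bool :=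
  pvOuterB combi check_ban 0

-- ===== PRECONDITION & SPEC =====
-- spec-side matcher (used only by Pre_, not by either port)
def pvMatchSpec : List Char → List Char → Bool
  | [], [] => true
  | x :: xs, y :: ys => (y == '*' || x == y) && pvMatchSpec xs ys
  | _, _ => false

-- Pre_ excludes exactly the inputs where A raises IndexError: check_ban shorter than combi
-- with every compared pair matching, so the loop reaches an index past the end of check_ban.
def Pre_find_ban (combi : List String) (check_ban : List String) : Prop :=
  combi.length ≤ check_ban.length ∨
    ∃ p ∈ combi.zip check_ban, pvMatchSpec p.1.toList p.2.toList = false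

instance (combi : List String) (check_ban : List String) : Decidable (Pre_find_ban combi check_ban) := by
  unfold Pre_find_ban; infer_instance

def pvWitness_find_ban : List String × List String := (["ab", "cd"], ["a*", "xd"])

def Spec_find_ban (combi : List String) (check_ban : List String) (out : Bool) : Prop := out = find_ban_alt combi check_ban
instance (combi : List String) (check_ban : List String) (out : Bool) : Decidable (Spec_find_ban combi check_ban out) := by unfold Spec_find_ban; infer_instance

-- ===== CLAIM (what is proved, stated in full; the proofs are below) =====
def Claim_equal_find_ban : Prop := ∀ (combi : List String) (check_ban : List String), Dom_find_ban combi check_ban → Pre_find_ban combi check_ban → Spec_find_ban combi check_ban (find_ban combi check_ban)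

-- ===== LEMMAS AND PROOFS =====

-- proof-side tail form of A's inner loop
def pvChk : List Char → List Char → Bool
  | [], _ => true
  | _ :: _, [] => false
  | x :: xs, y :: ys => if x ≠ y then (if y ≠ '*' then false else pvChk xs ys) else pvChk xs ys

theorem pvCharLoopA_eq_aux (u w : List Char) :
    ∀ n j, u.length - j = n → pvCharLoopA u w j = pvChk (u.drop j) (w.drop j) := by
  intro n
  induction n with
  | zero =>
      intro j hj
      have hle : u.length ≤ j := by omega
      unfold pvCharLoopA
      rw [dif_neg (by omega), List.drop_eq_nil_of_le hle]
      simp [pvChk]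
  | succ n ih =>
      intro j hj
      have h : j < u.length := by omega
      have hc : u.drop j = u[j] :: u.drop (j + 1) := List.drop_eq_getElem_cons h
      unfold pvCharLoopA
      rw [dif_pos h, PySem.List.pyGet?_natCast, PySem.List.pyGet?_natCast,
          List.getElem?_eq_getElem h]
      by_cases hjb : j < w.length
      · have hb' : w.drop j = w[j] :: w.drop (j + 1) := List.drop_eq_getElem_cons hjb
        rw [List.getElem?_eq_getElem hjb, hc, hb']
        have ih' := ih (j + 1) (by omega)
        by_cases h1 : u[j] = w[j]
        · simp [pvChk, h1, ih']
        · by_cases h2 : w[j] = '*' <;> simp [pvChk, h1, h2, ih']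
      · rw [List.getElem?_eq_none (l := w) (by omega),
            List.drop_eq_nil_of_le (as := w) (by omega), hc]
        simp [pvChk]

theorem pvCharLoopA_eq (u w : List Char) : pvCharLoopA u w 0 = pvChk u w := by
  simpa using pvCharLoopA_eq_aux u w u.length 0 rfl

-- with equal lengths, A's inner loop computes the matcher
theorem pvChk_matchSpec (us ws : List Char) :
    ((us.length == ws.length) && pvChk us ws) = pvMatchSpec us ws := by
  induction us generalizing ws with
  | nil => cases ws <;> simp [pvChk, pvMatchSpec]
  | cons x xs ih =>
      cases ws with
      | nil => simp [pvChk, pvMatchSpec]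
      | cons y ys =>
          have := ih ys
          by_cases h1 : x = y
          · simp [pvChk, pvMatchSpec, h1, ← this]
          · by_cases h2 : y = '*' <;>
              simp [pvChk, pvMatchSpec, h1, h2, ← this]

-- B's compile-then-fullmatch computes the matcher
theorem pvFullmatch_compile (us ws : List Char) :
    pvFullmatch (pvCompile ws) us = pvMatchSpec us ws := by
  induction us generalizing ws with
  | nil => cases ws with
    | nil => simp [pvCompile, pvFullmatch, pvMatchSpec]
    | cons y ys =>
        by_cases h : y = '*' <;> simp [pvCompile, pvFullmatch, pvMatchSpec, h]
  | cons x xs ih =>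
      cases ws with
      | nil => simp [pvCompile, pvFullmatch, pvMatchSpec]
      | cons y ys =>
          have hc : pvCompile (y :: ys)
              = (if y = '*' then pvTok.dot else pvTok.lit y) :: pvCompile ys := rfl
          have := ih ys
          by_cases h : y = '*'
          · rw [hc, if_pos h]
            simp [pvFullmatch, pvMatchSpec, h, this]
          · rw [hc, if_neg h]
            have h1 : (y == '*') = false := beq_eq_false_iff_ne.mpr h
            have h2 : (y == x) = (x == y) := by
              by_cases he : x = y
              · simp [he]
              · rw [beq_eq_false_iff_ne.mpr he, beq_eq_false_iff_ne.mpr (Ne.symm he)]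
            simp [pvFullmatch, pvMatchSpec, h1, this, h2]

-- A's per-pair test equals B's per-pair test
theorem pvPair_eq (s t : String) :
    (if PySem.Str.len s ≠ PySem.Str.len t then false
     else if pvCharLoopA s.toList t.toList 0 then true else false)
    = pvFullmatch (pvCompile t.toList) s.toList := by
  rw [pvFullmatch_compile, ← pvChk_matchSpec, pvCharLoopA_eq]
  by_cases hl : s.length = t.length
  · have h1 : ¬ PySem.Str.len s ≠ PySem.Str.len t := by simp [PySem.Str.len_eq, hl]
    have h2 : (s.toList.length == t.toList.length) = true := by
      simp [String.length_toList, hl]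
    rw [if_neg h1, h2, Bool.true_and]
    cases pvChk s.toList t.toList <;> simp
  · have h1 : PySem.Str.len s ≠ PySem.Str.len t := by simp [PySem.Str.len_eq, hl]
    have h2 : (s.toList.length == t.toList.length) = false := by
      simp [String.length_toList, hl]
    rw [if_pos h1, h2, Bool.false_and]

-- the two outer loops agree at every index
theorem pvOuter_eq (combi check_ban : List String) :
    ∀ n i, combi.length - i = n →
      pvOuterA combi check_ban i = pvOuterB combi check_ban i := by
  intro n
  induction n with
  | zero =>
      intro i hi
      unfold pvOuterA pvOuterB
      rw [dif_neg (by omega), dif_neg (by omega)]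
  | succ n ih =>
      intro i hi
      have h : i < combi.length := by omega
      unfold pvOuterA pvOuterB
      rw [dif_pos h, dif_pos h]
      cases hg1 : PySem.List.pyGet? combi (i : Int) with
      | none => rfl
      | some c =>
        cases hg2 : PySem.List.pyGet? check_ban (i : Int) with
        | none => rfl
        | some b =>
          have ih' := ih (i + 1) (by omega)
          have hp := pvPair_eq c b
          show (if PySem.Str.len c ≠ PySem.Str.len b then false
                else if pvCharLoopA c.toList b.toList 0 then pvOuterA combi check_ban (i + 1)
                else false)
              = (if pvFullmatch (pvCompile b.toList) c.toList then pvOuterB combi check_ban (i + 1)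
                 else false)
          by_cases hl : PySem.Str.len c ≠ PySem.Str.len b
          · rw [if_pos hl] at hp ⊢
            cases hm : pvFullmatch (pvCompile b.toList) c.toList
            · rw [if_neg (by simp [hm])]
            · exact absurd (hp.trans hm) (by simp)
          · rw [if_neg hl] at hp ⊢
            cases hm : pvCharLoopA c.toList b.toList 0
            · rw [if_neg (by simp [hm]),
                  if_neg (by rw [← hp]; simp [hm])]
            · rw [if_pos (by simp [hm]), if_pos (by rw [← hp]; simp [hm]), ih']

-- ===== VERDICT (by name: the statement is the Claim_ definition above) =====
theorem find_ban_spec : Claim_equal_find_ban := by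
  intro combi check_ban _ _
  unfold Spec_find_ban find_ban find_ban_alt
  exact pvOuter_eq combi check_ban combi.length 0 rfl
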